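-- pv_equiv track=rewrite | github.com/tramnhatquang/LeetCode-Solutions-Python | Least Consecutive Cards to Match.py | least_consecutive_cards_to_match
-- ===== SOURCE A (Python) =====
-- from collections import defaultdict
-- from typing import List
--
-- def least_consecutive_cards_to_match(cards: List[int]) -> int:
-- 	# WRITE YOUR BRILLIANT CODE HERE
-- 	# the question is something similar to find the shortest sliding window that has a duplicate
-- 	left = 0
-- 	length = len(cards) + 1
-- 	window = defaultdict(int)
--
-- 	for right in range(len(cards)):
-- 		window[cards[right]] += 1
-- 		while window[cards[right]] == 2:
-- 			length = min(length, right - left + 1)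
-- 			window[cards[left]] -= 1
-- 			left += 1
--
-- 	return length if length != len(cards) + 1 else -1
-- ===== SOURCE B (Python) =====
-- def least_consecutive_cards_to_match(cards):
--     # One pass with a last-seen-index dictionary: the shortest window with a
--     # duplicate always ends at the later card of a closest equal pair.
--     best = -1
--     last = {}
--     for i, c in enumerate(cards):
--         j = last.get(c)
--         if j is not None:
--             cand = i - j + 1
--             if best == -1 or cand < best:
--                 best = cand
--         last[c] = i
--     return best
-- ===== Notes on version B (the rewrite author's own statement) =====
-- stated objective: idiomatic
-- what changed: Replaces A's two-pointer sliding window with counter dict and inner shrink loop by a single pass keeping only the last-seen index of each value, taking the minimum distance between consecutive equal cards.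
import Mathlib
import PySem

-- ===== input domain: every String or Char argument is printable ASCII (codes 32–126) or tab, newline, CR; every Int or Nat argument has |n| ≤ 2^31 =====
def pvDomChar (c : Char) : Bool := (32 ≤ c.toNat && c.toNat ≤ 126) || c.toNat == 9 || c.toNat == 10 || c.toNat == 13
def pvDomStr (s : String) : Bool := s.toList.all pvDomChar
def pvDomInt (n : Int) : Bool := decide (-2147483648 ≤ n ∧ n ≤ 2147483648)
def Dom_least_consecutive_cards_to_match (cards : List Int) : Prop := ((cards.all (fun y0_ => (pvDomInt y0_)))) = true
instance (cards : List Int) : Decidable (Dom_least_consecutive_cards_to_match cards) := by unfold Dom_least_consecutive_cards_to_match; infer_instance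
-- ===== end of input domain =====

-- B replaces A's counter-based sliding window (two pointers plus an inner shrink loop)
-- by a single pass that keeps only the last-seen index of each card value.

-- ===== PORT A =====
-- A's inner `while window[cards[right]] == 2` loop; the fuel argument only bounds
-- the recursion (cards.length + 1 always suffices: `left` strictly increases and the
-- guard fails once it passes the previous occurrence of cards[right]).
def lcmWhile (cards : List Int) (right : Int) : Nat → Int × Int × PySem.Dict Int Int → Int × Int × PySem.Dict Int Int
  | 0, st => st
  | fuel+1, (left, length, window) =>
    if window.getD (PySem.List.pyGetD cards right 0) 0 = 2 then
      lcmWhile cards right fuel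
        (left + 1, min length (right - left + 1),
         window.modify (PySem.List.pyGetD cards left 0) 0 (· - 1))
    else (left, length, window)

def least_consecutive_cards_to_match (cards : List Int) : Int :=
  let n : Int := cards.length
  let st := (PySem.List.pyRange 0 n 1).foldl
    (fun (st : Int × Int × PySem.Dict Int Int) right =>
      lcmWhile cards right (cards.length + 1)
        (st.1, st.2.1, st.2.2.modify (PySem.List.pyGetD cards right 0) 0 (· + 1)))
    (0, n + 1, PySem.Dict.empty)
  if st.2.1 ≠ n + 1 then st.2.1 else -1

-- ===== PORT B =====
def least_consecutive_cards_to_match_alt (cards : List Int) : Int :=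
  ((PySem.List.enumerate cards).foldl
    (fun (st : Int × PySem.Dict Int Int) ic =>
      match st.2.get? ic.2 with
      | some j => ((if st.1 = -1 ∨ ic.1 - j + 1 < st.1 then ic.1 - j + 1 else st.1), st.2.insert ic.2 ic.1)
      | none => (st.1, st.2.insert ic.2 ic.1))
    (-1, PySem.Dict.empty)).1

-- ===== PRECONDITION & SPEC =====
def Spec_least_consecutive_cards_to_match (cards : List Int) (out : Int) : Prop := out = least_consecutive_cards_to_match_alt cards
instance (cards : List Int) (out : Int) : Decidable (Spec_least_consecutive_cards_to_match cards out) := by unfold Spec_least_consecutive_cards_to_match; infer_instance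

-- ===== CLAIM (what is proved, stated in full; the proofs are below) =====
def Claim_equal_least_consecutive_cards_to_match : Prop := ∀ (cards : List Int), Dom_least_consecutive_cards_to_match cards → Spec_least_consecutive_cards_to_match cards (least_consecutive_cards_to_match cards)

-- ===== LEMMAS AND PROOFS =====

def lastOcc : List Int → Int → Option Nat
  | [], _ => none
  | x :: xs, v =>
    match lastOcc xs v with
    | some p => some (p + 1)
    | none => if x = v then some 0 else none

theorem lastOcc_append (xs : List Int) (c v : Int) :
    lastOcc (xs ++ [c]) v = if c = v then some xs.length else lastOcc xs v := by
  induction xs with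
  | nil => by_cases h : c = v <;> simp [lastOcc, h]
  | cons x xs ih =>
    simp only [List.cons_append, lastOcc, ih]
    by_cases h : c = v <;> simp [h]

theorem lastOcc_getElem (xs : List Int) (v : Int) (p : Nat) :
    lastOcc xs v = some p → ∃ hp : p < xs.length, xs[p] = v := by
  induction xs generalizing p with
  | nil => intro h; simp [lastOcc] at h
  | cons x xs ih =>
    intro h
    simp only [lastOcc] at h
    cases hx : lastOcc xs v with
    | some q =>
      rw [hx] at h; simp only [Option.some.injEq] at h
      obtain ⟨hq, hv⟩ := ih q hx
      subst h
      exact ⟨by simpa using Nat.succ_lt_succ hq, by simpa using hv⟩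
    | none =>
      rw [hx] at h
      by_cases hxv : x = v
      · simp only [hxv, if_true, Option.some.injEq] at h
        subst h
        exact ⟨by simp, by simpa using hxv⟩
      · simp [hxv] at h

theorem lastOcc_none_not_mem (xs : List Int) (v : Int) :
    lastOcc xs v = none → v ∉ xs := by
  induction xs with
  | nil => intro _; simp
  | cons x xs ih =>
    intro h
    simp only [lastOcc] at h
    cases hx : lastOcc xs v with
    | some q => rw [hx] at h; exact absurd h (by simp)
    | none =>
      rw [hx] at h
      by_cases hxv : x = v
      · simp [hxv] at h
      · simp only [List.mem_cons, not_or]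
        exact ⟨fun e => hxv e.symm, ih hx⟩

theorem lastOcc_mem_drop (xs : List Int) (v : Int) (p : Nat) :
    lastOcc xs v = some p → ∀ q, v ∈ xs.drop q ↔ q ≤ p := by
  induction xs generalizing p with
  | nil => intro h; simp [lastOcc] at h
  | cons x xs ih =>
    intro h q
    simp only [lastOcc] at h
    cases hx : lastOcc xs v with
    | some q' =>
      rw [hx] at h; simp only [Option.some.injEq] at h
      subst h
      cases q with
      | zero => simpa using Or.inr ((ih q' hx 0).2 (Nat.zero_le _))
      | succ q'' =>
        rw [List.drop_succ_cons]
        rw [ih q' hx q'']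
        omega
    | none =>
      rw [hx] at h
      by_cases hxv : x = v
      · simp only [hxv, if_true, Option.some.injEq] at h
        subst h
        cases q with
        | zero => simp [hxv]
        | succ q'' =>
          rw [List.drop_succ_cons]
          simp only [Nat.succ_le_iff]
          constructor
          · intro hm; exact absurd (List.mem_of_mem_drop hm) (lastOcc_none_not_mem xs v hx)
          · omega
      · simp [hxv] at h

def updB (b v : Int) : Int := if b = -1 ∨ v < b then v else b

def refAux (pre : List Int) : List Int → Int → Int
  | [], b => b
  | c :: rest, b =>
    refAux (pre ++ [c]) rest
      (match lastOcc pre c with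
       | none => b
       | some p => updB b ((pre.length : Int) - (p : Int) + 1))

theorem refAux_le (rest : List Int) : ∀ (pre : List Int) (b : Int),
    (b = -1 ∨ b ≤ (pre.length : Int)) →
    (refAux pre rest b = -1 ∨ refAux pre rest b ≤ ((pre.length + rest.length : Nat) : Int)) := by
  induction rest with
  | nil => intro pre b hb; simpa [refAux] using hb
  | cons c rest ih =>
    intro pre b hb
    have hlen : (((pre ++ [c]).length : Nat) : Int) = (pre.length : Int) + 1 := by simp
    simp only [refAux]
    set b' := (match lastOcc pre c with
       | none => b
       | some p => updB b ((pre.length : Int) - (p : Int) + 1)) with hb'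
    have hb'le : b' = -1 ∨ b' ≤ ((pre ++ [c]).length : Int) := by
      rw [hb']
      split
      · rcases hb with h | h
        · exact Or.inl h
        · exact Or.inr (by omega)
      · next p heq =>
          obtain ⟨hp, -⟩ := lastOcc_getElem pre c p heq
          right
          rw [updB]
          split <;> omega
    rcases ih (pre ++ [c]) b' hb'le with h | h
    · exact Or.inl h
    · right
      refine h.trans ?_
      simp only [List.length_append, List.length_cons, List.length_nil, Nat.cast_add]
      omega

theorem foldB (rest : List Int) : ∀ (pre : List Int) (b : Int) (d : PySem.Dict Int Int),
    (∀ v, d.get? v = (lastOcc pre v).map (fun p => (p : Int))) →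
    ((PySem.List.enumerate rest (pre.length : Int)).foldl
      (fun (st : Int × PySem.Dict Int Int) ic =>
        match st.2.get? ic.2 with
        | some j => ((if st.1 = -1 ∨ ic.1 - j + 1 < st.1 then ic.1 - j + 1 else st.1), st.2.insert ic.2 ic.1)
        | none => (st.1, st.2.insert ic.2 ic.1))
      (b, d)).1 = refAux pre rest b := by
  induction rest with
  | nil => intro pre b d hd; simp [PySem.List.enumerate_nil, refAux]
  | cons c rest ih =>
    intro pre b d hd
    rw [PySem.List.enumerate_cons, List.foldl_cons]
    have hins : ∀ v, (d.insert c (pre.length : Int)).get? v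
        = (lastOcc (pre ++ [c]) v).map (fun p => (p : Int)) := by
      intro v
      rw [PySem.Dict.get?_insert, lastOcc_append]
      by_cases hv : v = c
      · simp [hv]
      · simp only [hv, if_false, hd v]
        have : ¬ c = v := fun e => hv e.symm
        simp [this]
    have hstep : ((pre.length : Int) + 1) = (((pre ++ [c]).length : Nat) : Int) := by simp
    simp only [refAux]
    rw [hd c]
    cases hc : lastOcc pre c with
    | none =>
      rw [hstep]
      exact ih (pre ++ [c]) b _ hins
    | some p =>
      rw [hstep]
      have := ih (pre ++ [c]) (updB b ((pre.length : Int) - (p : Int) + 1)) _ hins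
      rw [← this]
      rfl

theorem lcmWhile_stop (cards : List Int) (right : Int) (fuel : Nat) (l len : Int)
    (w : PySem.Dict Int Int) (h : w.getD (PySem.List.pyGetD cards right 0) 0 ≠ 2) :
    lcmWhile cards right fuel (l, len, w) = (l, len, w) := by
  cases fuel <;> simp [lcmWhile, h]

theorem pyGetD_app_mid (pre rest : List Int) (c : Int) :
    PySem.List.pyGetD (pre ++ c :: rest) (pre.length : Int) 0 = c := by
  simp [List.getD_eq_getElem?_getD]

theorem pyGetD_app_left (pre rest : List Int) (k : Nat) (h : k < pre.length) :
    PySem.List.pyGetD (pre ++ rest) (k : Int) 0 = pre[k] := by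
  simp [List.getD_eq_getElem?_getD, List.getElem?_append_left h, h]

theorem lcmWhile_run (pre rest : List Int) (c : Int) (p : Nat)
    (hp : lastOcc pre c = some p) (fuel : Nat) :
    ∀ (lN : Nat) (len : Int) (w : PySem.Dict Int Int),
    (∀ v, w.getD v 0 = ((pre.drop lN ++ [c]).count v : Int)) →
    (pre.drop lN).Nodup →
    lN ≤ p → p - lN < fuel →
    ∃ w', lcmWhile (pre ++ c :: rest) (pre.length : Int) fuel ((lN : Int), len, w)
        = ((p : Int) + 1, min len ((pre.length : Int) - (p : Int) + 1), w')
      ∧ ∀ v, w'.getD v 0 = ((pre.drop (p + 1) ++ [c]).count v : Int) := by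
  obtain ⟨hplt, hpv⟩ := lastOcc_getElem pre c p hp
  have hcnotin : c ∉ pre.drop (p + 1) := fun hm => by
    have := (lastOcc_mem_drop pre c p hp (p + 1)).1 hm
    omega
  induction fuel with
  | zero => intro lN len w _ _ _ hf; omega
  | succ f ihf =>
    intro lN len w hw hnd hlNp _
    have hlNlt : lN < pre.length := lt_of_le_of_lt hlNp hplt
    have hc_at : PySem.List.pyGetD (pre ++ c :: rest) (pre.length : Int) 0 = c :=
      pyGetD_app_mid pre rest c
    have hcmem : c ∈ pre.drop lN := (lastOcc_mem_drop pre c p hp lN).2 hlNp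
    have hcount1 : (pre.drop lN).count c = 1 := List.count_eq_one_of_mem hnd hcmem
    have hguard : w.getD c 0 = 2 := by
      rw [hw c]
      simp [List.count_append, hcount1]
    have hx_at : PySem.List.pyGetD (pre ++ c :: rest) ((lN : Nat) : Int) 0 = pre[lN] :=
      pyGetD_app_left pre (c :: rest) lN hlNlt
    have hdrop : pre.drop lN = pre[lN] :: pre.drop (lN + 1) := List.drop_eq_getElem_cons hlNlt
    simp only [lcmWhile, hc_at, hguard, if_pos, hx_at]
    have hw2 : ∀ v, (w.modify pre[lN] 0 (· - 1)).getD v 0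
        = ((pre.drop (lN + 1) ++ [c]).count v : Int) := by
      intro v
      rw [PySem.Dict.getD_modify]
      by_cases hvx : v = pre[lN]
      · have hx := hw pre[lN]
        rw [hdrop] at hx
        rw [if_pos hvx, hvx, hx]
        have hcc : ((pre[lN] :: pre.drop (lN+1)) ++ [c]).count pre[lN]
            = (pre.drop (lN+1) ++ [c]).count pre[lN] + 1 := by
          rw [List.cons_append, List.count_cons_self]
        rw [hcc]
        push_cast
        omega
      · rw [if_neg hvx, hw, hdrop]
        have : (pre[lN] :: pre.drop (lN + 1)) ++ [c] = pre[lN] :: (pre.drop (lN + 1) ++ [c]) := rfl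
        have hvx' : ¬ pre[lN] = v := fun e => hvx e.symm
        rw [this, List.count_cons]
        simp [hvx']
    rcases Nat.eq_or_lt_of_le hlNp with heq | hlt
    · subst heq
      have hguard2 : (w.modify pre[lN] 0 (· - 1)).getD c 0 ≠ 2 := by
        rw [hw2 c]
        have h0 : (pre.drop (lN + 1)).count c = 0 := List.count_eq_zero_of_not_mem hcnotin
        simp [List.count_append, h0]
      rw [lcmWhile_stop _ _ _ _ _ _ (by rw [hc_at]; exact hguard2)]
      exact ⟨_, rfl, hw2⟩
    · have hnd2 : (pre.drop (lN + 1)).Nodup := by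
        rw [hdrop] at hnd; exact hnd.of_cons
      obtain ⟨w', heqn, hw'⟩ := ihf (lN + 1) (min len ((pre.length : Int) - (lN : Int) + 1)) _ hw2 hnd2 (by omega) (by omega)
      refine ⟨w', ?_, hw'⟩
      push_cast at heqn
      rw [heqn]
      have hmin : min (min len ((pre.length : Int) - (lN : Int) + 1)) ((pre.length : Int) - (p : Int) + 1)
          = min len ((pre.length : Int) - (p : Int) + 1) := by
        simp only [min_def]
        split_ifs <;> omega
      rw [hmin]

theorem foldA (cards : List Int) (rest : List Int) : ∀ (pre : List Int) (lN : Nat) (b len : Int) (w : PySem.Dict Int Int),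
    cards = pre ++ rest →
    (∀ v, w.getD v 0 = ((pre.drop lN).count v : Int)) →
    (pre.drop lN).Nodup →
    lN ≤ pre.length →
    len = (if b = -1 then (cards.length : Int) + 1 else b) →
    (b = -1 ∨ (2 ≤ b ∧ b ≤ (pre.length : Int))) →
    (0 < lN → b ≠ -1 ∧ b ≤ (pre.length : Int) - (lN : Int) + 1) →
    ((PySem.List.enumerate rest (pre.length : Int)).foldl
      (fun (st : Int × Int × PySem.Dict Int Int) ic =>
        lcmWhile cards ic.1 (cards.length + 1)
          (st.1, st.2.1, st.2.2.modify (PySem.List.pyGetD cards ic.1 0) 0 (· + 1)))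
      ((lN : Int), len, w)).2.1
    = (if refAux pre rest b = -1 then (cards.length : Int) + 1 else refAux pre rest b) := by
  induction rest with
  | nil =>
    intro pre lN b len w _ _ _ _ hlen _ _
    simpa [PySem.List.enumerate_nil, refAux] using hlen
  | cons c rest ih =>
    intro pre lN b len w hcards hw hnd hlN hlen hb hJ
    subst hcards
    rw [PySem.List.enumerate_cons, List.foldl_cons]
    have hc_at : PySem.List.pyGetD (pre ++ c :: rest) (pre.length : Int) 0 = c :=
      pyGetD_app_mid pre rest c
    have hstep : ((pre.length : Int) + 1) = (((pre ++ [c]).length : Nat) : Int) := by simp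
    have hlapp : (((pre ++ [c]).length : Nat) : Int) = (pre.length : Int) + 1 := by simp
    have hassoc : pre ++ c :: rest = (pre ++ [c]) ++ rest := by simp
    have hw1 : ∀ v, (w.modify c 0 (· + 1)).getD v 0 = ((pre.drop lN ++ [c]).count v : Int) := by
      intro v
      rw [PySem.Dict.getD_modify]
      by_cases hvc : v = c
      · rw [if_pos hvc, hw, hvc]
        simp [List.count_append]
      · rw [if_neg hvc, hw]
        simp [List.count_append, List.count_eq_zero_of_not_mem (show v ∉ [c] by simp [hvc])]
    simp only [hc_at]
    cases hc : lastOcc pre c with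
    | none =>
      have hcnot : c ∉ pre.drop lN := fun hm => lastOcc_none_not_mem pre c hc (List.mem_of_mem_drop hm)
      have hstop : (w.modify c 0 (· + 1)).getD c 0 ≠ 2 := by
        rw [hw1 c]
        have h0 : (pre.drop lN).count c = 0 := List.count_eq_zero_of_not_mem hcnot
        simp [List.count_append, h0]
      rw [lcmWhile_stop _ _ _ _ _ _ (by rw [hc_at]; exact hstop)]
      have hdap : (pre ++ [c]).drop lN = pre.drop lN ++ [c] := List.drop_append_of_le_length hlN
      rw [hstep]
      have := ih (pre ++ [c]) lN b len (w.modify c 0 (· + 1)) hassoc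
        (by intro v; rw [hdap]; exact hw1 v)
        (by rw [hdap]; exact hnd.append (List.nodup_singleton c) (List.disjoint_singleton.mpr hcnot))
        (by simp; omega)
        hlen
        (by rcases hb with h | ⟨h1, h2⟩
            · exact Or.inl h
            · exact Or.inr ⟨h1, by omega⟩)
        (by intro h0; obtain ⟨h1, h2⟩ := hJ h0; exact ⟨h1, by omega⟩)
      rw [this]
      simp only [refAux, hc]
    | some p =>
      obtain ⟨hplt, hpv⟩ := lastOcc_getElem pre c p hc
      by_cases hcase : lN ≤ p
      · obtain ⟨w', heqn, hw'⟩ := lcmWhile_run pre rest c p hc ((pre ++ c :: rest).length + 1)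
          lN len (w.modify c 0 (· + 1)) hw1 hnd hcase (by simp; omega)
        rw [heqn]
        have hcast : ((p : Int) + 1) = (((p + 1 : Nat)) : Int) := by push_cast; ring
        have hcnot1 : c ∉ pre.drop (p + 1) := fun hm => by
          have := (lastOcc_mem_drop pre c p hc (p + 1)).1 hm
          omega
        have hnd1 : (pre.drop (p + 1)).Nodup := by
          have hdd : pre.drop (p + 1) = (pre.drop lN).drop (p + 1 - lN) := by
            rw [List.drop_drop]; congr 1; omega
          rw [hdd]
          exact (List.drop_sublist _ _).nodup hnd
        have hdap1 : (pre ++ [c]).drop (p + 1) = pre.drop (p + 1) ++ [c] :=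
          List.drop_append_of_le_length (by omega)
        have hminb : min len ((pre.length : Int) - (p : Int) + 1)
            = (if updB b ((pre.length : Int) - (p : Int) + 1) = -1
               then (((pre ++ c :: rest).length : Nat) : Int) + 1
               else updB b ((pre.length : Int) - (p : Int) + 1)) := by
          rw [hlen]
          unfold updB
          have : (((pre ++ c :: rest).length : Nat) : Int) = (pre.length : Int) + 1 + rest.length := by
            simp; omega
          rw [this]
          simp only [min_def]
          split_ifs <;> omega
        rw [hcast, hstep, hminb]
        have := ih (pre ++ [c]) (p + 1) (updB b ((pre.length : Int) - (p : Int) + 1))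
          (if updB b ((pre.length : Int) - (p : Int) + 1) = -1
           then (((pre ++ c :: rest).length : Nat) : Int) + 1
           else updB b ((pre.length : Int) - (p : Int) + 1)) w' hassoc
          (by intro v; rw [hdap1]; exact hw' v)
          (by rw [hdap1]; exact hnd1.append (List.nodup_singleton c) (List.disjoint_singleton.mpr hcnot1))
          (by simp; omega)
          rfl
          (by right
              constructor
              · unfold updB; split_ifs <;> omega
              · rw [hlapp]; unfold updB; split_ifs <;> omega)
          (by intro _
              constructor
              · unfold updB; split_ifs <;> omega
              · rw [hlapp]; push_cast; unfold updB; split_ifs <;> omega)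
        rw [this]
        simp only [refAux, hc]
      · have h0lN : 0 < lN := by omega
        obtain ⟨hbne, hble⟩ := hJ h0lN
        have hcnot : c ∉ pre.drop lN := fun hm => hcase ((lastOcc_mem_drop pre c p hc lN).1 hm)
        have hstop : (w.modify c 0 (· + 1)).getD c 0 ≠ 2 := by
          rw [hw1 c]
          have h0 : (pre.drop lN).count c = 0 := List.count_eq_zero_of_not_mem hcnot
          simp [List.count_append, h0]
        rw [lcmWhile_stop _ _ _ _ _ _ (by rw [hc_at]; exact hstop)]
        have hdap : (pre ++ [c]).drop lN = pre.drop lN ++ [c] := List.drop_append_of_le_length hlN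
        rw [hstep]
        have hupd : updB b ((pre.length : Int) - (p : Int) + 1) = b := by
          unfold updB; rw [if_neg (by omega)]
        have := ih (pre ++ [c]) lN b len (w.modify c 0 (· + 1)) hassoc
          (by intro v; rw [hdap]; exact hw1 v)
          (by rw [hdap]; exact hnd.append (List.nodup_singleton c) (List.disjoint_singleton.mpr hcnot))
          (by simp; omega)
          hlen
          (by rcases hb with h | ⟨h1, h2⟩
              · exact Or.inl h
              · exact Or.inr ⟨h1, by omega⟩)
          (by intro h0; exact ⟨hbne, by omega⟩)
        rw [this]
        simp only [refAux, hc, hupd]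

theorem portA_eq_portB (cards : List Int) :
    least_consecutive_cards_to_match cards = least_consecutive_cards_to_match_alt cards := by
  have hB := foldB cards [] (-1) PySem.Dict.empty
    (by intro v; simp [lastOcc, PySem.Dict.get?, PySem.Dict.empty])
  have hA := foldA cards cards [] 0 (-1) ((cards.length : Int) + 1) PySem.Dict.empty
    (List.nil_append cards).symm
    (by intro v; simp [PySem.Dict.getD, PySem.Dict.get?, PySem.Dict.empty])
    (by simp)
    (by simp)
    (by simp)
    (Or.inl rfl)
    (by intro h; exact absurd h (by omega))
  simp only [List.length_nil, Nat.cast_zero] at hA hB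
  have hrle : refAux [] cards (-1) = -1 ∨ refAux [] cards (-1) ≤ (cards.length : Int) := by
    simpa using refAux_le cards [] (-1) (Or.inl rfl)
  have hA' : ((PySem.List.pyRange 0 ((cards.length : Nat) : Int) 1).foldl
      (fun (st : Int × Int × PySem.Dict Int Int) right =>
        lcmWhile cards right (cards.length + 1)
          (st.1, st.2.1, st.2.2.modify (PySem.List.pyGetD cards right 0) 0 (· + 1)))
      (0, (cards.length : Int) + 1, PySem.Dict.empty)).2.1
      = (if refAux [] cards (-1) = -1 then (cards.length : Int) + 1 else refAux [] cards (-1)) := by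
    rw [show PySem.List.pyRange 0 ((cards.length : Nat) : Int) 1 = (PySem.List.enumerate cards 0).map (·.1) from
      by rw [PySem.List.map_fst_enumerate]; norm_num]
    rw [List.foldl_map]
    simpa using hA
  unfold least_consecutive_cards_to_match least_consecutive_cards_to_match_alt
  simp only []
  rw [hA', hB]
  rcases hrle with h | h
  · simp [h]
  · split_ifs <;> omega

-- ===== VERDICT (by name: the statement is the Claim_ definition above) =====
theorem least_consecutive_cards_to_match_spec : Claim_equal_least_consecutive_cards_to_match := by
  intro cards _
  unfold Spec_least_consecutive_cards_to_match
  exact portA_eq_portB cards
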